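-- pv_equiv track=rewrite | github.com/leehyon/kohstool-guide | process_changes.py | _detect_platforms
-- ===== SOURCE A (Python) =====
-- from typing import Dict, Iterable, List, Optional, Tuple
--
-- def _detect_platforms(text: str) -> List[str]:
--     lowered = text.lower()
--     platforms: List[str] = []
--     if any(token in lowered for token in ("windows", "win32", "win 10", "win 11")):
--         platforms.append("Windows")
--     if any(token in lowered for token in ("macos", "os x", "mac")):
--         platforms.append("Mac")
--     if "linux" in lowered:
--         platforms.append("Linux")
--     if any(token in lowered for token in ("ios", "iphone", "ipad")):
--         platforms.append("iOS")
--     if "android" in lowered: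
--         platforms.append("Android")
--     if any(token in lowered for token in ("browser extension", "chrome extension", "firefox addon", "firefox add-on")):
--         platforms.append("Browser Extension")
--     if any(token in lowered for token in ("web", "saas", "in your browser", "browser-based")):
--         platforms.append("Web")
--     if not platforms:
--         platforms.append("Web")
--     # Stable ordering
--     order = ["Web", "Browser Extension", "Windows", "Mac", "Linux", "iOS", "Android"]
--     return [p for p in order if p in platforms]
-- ===== SOURCE B (Python) =====
-- def _detect_platforms(text):
--     lowered = text.lower()
--     token_map = [
--         ("windows", "Windows"), ("win32", "Windows"), ("win 10", "Windows"), ("win 11", "Windows"),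
--         ("macos", "Mac"), ("os x", "Mac"), ("mac", "Mac"),
--         ("linux", "Linux"),
--         ("ios", "iOS"), ("iphone", "iOS"), ("ipad", "iOS"),
--         ("android", "Android"),
--         ("browser extension", "Browser Extension"), ("chrome extension", "Browser Extension"),
--         ("firefox addon", "Browser Extension"), ("firefox add-on", "Browser Extension"),
--         ("web", "Web"), ("saas", "Web"), ("in your browser", "Web"), ("browser-based", "Web"),
--     ]
--     found = set()
--     for i in range(len(lowered)):
--         for token, platform in token_map:
--             if lowered.startswith(token, i):
--                 found.add(platform)
--     result = [p for p in ("Web", "Browser Extension", "Windows", "Mac", "Linux", "iOS", "Android") if p in found]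
--     return result if result else ["Web"]
-- ===== Notes on version B (the rewrite author's own statement) =====
-- stated objective: alternative
-- what changed: Replaces A's per-platform repeated substring searches (one 'token in lowered' scan per token, then a reorder filter over a separate order list) with a single left-to-right scan of the lowered text that matches every token of a token-to-platform table at each position into one found-set, then emits the fixed platform order with the empty default.
import Mathlib
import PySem

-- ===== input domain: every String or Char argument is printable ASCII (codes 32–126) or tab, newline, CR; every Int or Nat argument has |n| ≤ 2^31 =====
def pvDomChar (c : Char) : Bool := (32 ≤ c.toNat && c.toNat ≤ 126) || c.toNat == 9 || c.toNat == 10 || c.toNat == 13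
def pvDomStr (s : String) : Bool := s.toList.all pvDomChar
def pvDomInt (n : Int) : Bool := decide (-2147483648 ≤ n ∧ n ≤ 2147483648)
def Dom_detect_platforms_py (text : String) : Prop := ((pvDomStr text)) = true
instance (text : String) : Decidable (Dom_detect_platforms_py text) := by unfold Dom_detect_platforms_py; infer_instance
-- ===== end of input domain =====

-- B replaces A's per-platform repeated substring searches by a single left-to-right scan of the
-- lowered text that matches all tokens at each position into one found-set; objective: alternative.

-- ===== PORT A =====
def detect_platforms_py (text : String) : List String :=
  let lowered := PySem.Str.lower text
  let platforms : List String := []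
  let platforms := if (["windows", "win32", "win 10", "win 11"] : List String).any
      (fun token => PySem.Str.isIn token lowered) then platforms ++ ["Windows"] else platforms
  let platforms := if (["macos", "os x", "mac"] : List String).any
      (fun token => PySem.Str.isIn token lowered) then platforms ++ ["Mac"] else platforms
  let platforms := if PySem.Str.isIn "linux" lowered then platforms ++ ["Linux"] else platforms
  let platforms := if (["ios", "iphone", "ipad"] : List String).any
      (fun token => PySem.Str.isIn token lowered) then platforms ++ ["iOS"] else platforms
  let platforms := if PySem.Str.isIn "android" lowered then platforms ++ ["Android"] else platforms
  let platforms := if (["browser extension", "chrome extension", "firefox addon", "firefox add-on"] : List String).any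
      (fun token => PySem.Str.isIn token lowered) then platforms ++ ["Browser Extension"] else platforms
  let platforms := if (["web", "saas", "in your browser", "browser-based"] : List String).any
      (fun token => PySem.Str.isIn token lowered) then platforms ++ ["Web"] else platforms
  let platforms := if platforms = [] then platforms ++ ["Web"] else platforms
  let order : List String := ["Web", "Browser Extension", "Windows", "Mac", "Linux", "iOS", "Android"]
  order.filter (fun p => platforms.contains p)

-- ===== PORT B =====
def pvTokenMap : List (String × String) :=
  [("windows", "Windows"), ("win32", "Windows"), ("win 10", "Windows"), ("win 11", "Windows"),
   ("macos", "Mac"), ("os x", "Mac"), ("mac", "Mac"),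
   ("linux", "Linux"),
   ("ios", "iOS"), ("iphone", "iOS"), ("ipad", "iOS"),
   ("android", "Android"),
   ("browser extension", "Browser Extension"), ("chrome extension", "Browser Extension"),
   ("firefox addon", "Browser Extension"), ("firefox add-on", "Browser Extension"),
   ("web", "Web"), ("saas", "Web"), ("in your browser", "Web"), ("browser-based", "Web")]

-- lowered.startswith(token, i) with 0 ≤ i is ported by hand as a prefix test on the char list
-- dropped at i (exact: for i ≥ len and a nonempty token Python returns False, as does the port).
def detect_platforms_py_alt (text : String) : List String :=
  let l := (PySem.Str.lower text).toList
  let found : PySem.Set String :=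
    (List.range l.length).foldl (fun found i =>
      pvTokenMap.foldl (fun found tp =>
        if PySem.Chars.startswith (l.drop i) tp.1.toList then PySem.Set.add found tp.2 else found)
        found) PySem.Set.empty
  let result := (["Web", "Browser Extension", "Windows", "Mac", "Linux", "iOS", "Android"] : List String).filter
      (fun p => PySem.Set.contains found p)
  if result = [] then ["Web"] else result

-- ===== PRECONDITION & SPEC =====
def Spec_detect_platforms_py (text : String) (out : List String) : Prop := out = detect_platforms_py_alt text
instance (text : String) (out : List String) : Decidable (Spec_detect_platforms_py text out) := by unfold Spec_detect_platforms_py; infer_instance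

-- ===== CLAIM (what is proved, stated in full; the proofs are below) =====
def Claim_equal_detect_platforms_py : Prop := ∀ (text : String), Dom_detect_platforms_py text → Spec_detect_platforms_py text (detect_platforms_py text)

-- ===== LEMMAS AND PROOFS =====

-- membership through a foldl whose step adds elements described by P
theorem mem_foldl_step {β : Type} (step : PySem.Set String → β → PySem.Set String)
    (P : β → String → Prop)
    (h : ∀ (s : PySem.Set String) (b : β) (q : String), q ∈ step s b ↔ q ∈ s ∨ P b q)
    (xs : List β) (s : PySem.Set String) (q : String) :
    q ∈ xs.foldl step s ↔ q ∈ s ∨ ∃ b ∈ xs, P b q := by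
  induction xs generalizing s with
  | nil => simp
  | cons x xs ih => simp [List.foldl_cons, ih, h]; tauto

theorem mem_inner (l : List Char) (i : Nat) (s : PySem.Set String) (q : String) :
    q ∈ pvTokenMap.foldl (fun found tp =>
        if PySem.Chars.startswith (l.drop i) tp.1.toList then PySem.Set.add found tp.2 else found) s ↔
      q ∈ s ∨ ∃ tp ∈ pvTokenMap, PySem.Chars.startswith (l.drop i) tp.1.toList = true ∧ q = tp.2 := by
  apply mem_foldl_step
  intro s tp q
  split <;> simp_all [PySem.Set.mem_add]

theorem mem_found (l : List Char) (q : String) :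
    q ∈ (List.range l.length).foldl (fun found i =>
        pvTokenMap.foldl (fun found tp =>
          if PySem.Chars.startswith (l.drop i) tp.1.toList then PySem.Set.add found tp.2 else found)
          found) PySem.Set.empty ↔
      ∃ tp ∈ pvTokenMap, PySem.Chars.isIn tp.1.toList l = true ∧ q = tp.2 := by
  rw [mem_foldl_step _ (fun i q => ∃ tp ∈ pvTokenMap, PySem.Chars.startswith (l.drop i) tp.1.toList = true ∧ q = tp.2) (fun s i q => mem_inner l i s q)]
  simp only [PySem.Set.empty, List.not_mem_nil, false_or]
  constructor
  · rintro ⟨i, hi, tp, htp, hpre, rfl⟩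
    exact ⟨tp, htp, (PySem.Chars.exists_prefix_drop_iff_isIn _ _).1 ⟨i, (PySem.Chars.startswith_iff _ _).1 hpre⟩, rfl⟩
  · rintro ⟨tp, htp, hin, rfl⟩
    obtain ⟨j, hj⟩ := (PySem.Chars.exists_prefix_drop_iff_isIn _ _).2 hin
    have htok : tp.1.toList ≠ [] := by
      revert htp; unfold pvTokenMap; intro htp
      simp only [List.mem_cons, List.not_mem_nil, or_false] at htp
      rcases htp with h|h|h|h|h|h|h|h|h|h|h|h|h|h|h|h|h|h|h|h <;> subst h <;> decide
    have hjlt : j < l.length := by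
      by_contra hge
      push_neg at hge
      rw [List.drop_eq_nil_of_le hge] at hj
      exact htok (List.prefix_nil.mp hj)
    exact ⟨j, List.mem_range.mpr hjlt, tp, htp, (PySem.Chars.startswith_iff _ _).2 hj, rfl⟩

theorem set_contains_eq (s : PySem.Set String) (x : String) :
    PySem.Set.contains s x = decide (x ∈ s) := by
  simp [PySem.Set.contains]

def spec7 (b1 b2 b3 b4 b5 b6 b7 : Bool) : List String :=
  let r := (["Web", "Browser Extension", "Windows", "Mac", "Linux", "iOS", "Android"] : List String).filter
    (fun p => if p = "Web" then b7 else if p = "Browser Extension" then b6 else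
      if p = "Windows" then b1 else if p = "Mac" then b2 else if p = "Linux" then b3 else
      if p = "iOS" then b4 else b5)
  if r = [] then ["Web"] else r

set_option maxHeartbeats 1000000 in
theorem a_eq_spec7 (text : String) :
    detect_platforms_py text = spec7
      (PySem.Str.isIn "windows" (PySem.Str.lower text) || (PySem.Str.isIn "win32" (PySem.Str.lower text) || (PySem.Str.isIn "win 10" (PySem.Str.lower text) || PySem.Str.isIn "win 11" (PySem.Str.lower text))))
      (PySem.Str.isIn "macos" (PySem.Str.lower text) || (PySem.Str.isIn "os x" (PySem.Str.lower text) || PySem.Str.isIn "mac" (PySem.Str.lower text)))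
      (PySem.Str.isIn "linux" (PySem.Str.lower text))
      (PySem.Str.isIn "ios" (PySem.Str.lower text) || (PySem.Str.isIn "iphone" (PySem.Str.lower text) || PySem.Str.isIn "ipad" (PySem.Str.lower text)))
      (PySem.Str.isIn "android" (PySem.Str.lower text))
      (PySem.Str.isIn "browser extension" (PySem.Str.lower text) || (PySem.Str.isIn "chrome extension" (PySem.Str.lower text) || (PySem.Str.isIn "firefox addon" (PySem.Str.lower text) || PySem.Str.isIn "firefox add-on" (PySem.Str.lower text))))
      (PySem.Str.isIn "web" (PySem.Str.lower text) || (PySem.Str.isIn "saas" (PySem.Str.lower text) || (PySem.Str.isIn "in your browser" (PySem.Str.lower text) || PySem.Str.isIn "browser-based" (PySem.Str.lower text)))) := by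
  unfold detect_platforms_py
  dsimp only
  simp only [List.any_cons, List.any_nil, Bool.or_false]
  generalize (PySem.Str.isIn "windows" (PySem.Str.lower text) || (PySem.Str.isIn "win32" (PySem.Str.lower text) || (PySem.Str.isIn "win 10" (PySem.Str.lower text) || (PySem.Str.isIn "win 11" (PySem.Str.lower text))))) = b1
  generalize (PySem.Str.isIn "macos" (PySem.Str.lower text) || (PySem.Str.isIn "os x" (PySem.Str.lower text) || (PySem.Str.isIn "mac" (PySem.Str.lower text)))) = b2
  generalize (PySem.Str.isIn "linux" (PySem.Str.lower text)) = b3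
  generalize (PySem.Str.isIn "ios" (PySem.Str.lower text) || (PySem.Str.isIn "iphone" (PySem.Str.lower text) || (PySem.Str.isIn "ipad" (PySem.Str.lower text)))) = b4
  generalize (PySem.Str.isIn "android" (PySem.Str.lower text)) = b5
  generalize (PySem.Str.isIn "browser extension" (PySem.Str.lower text) || (PySem.Str.isIn "chrome extension" (PySem.Str.lower text) || (PySem.Str.isIn "firefox addon" (PySem.Str.lower text) || (PySem.Str.isIn "firefox add-on" (PySem.Str.lower text))))) = b6
  generalize (PySem.Str.isIn "web" (PySem.Str.lower text) || (PySem.Str.isIn "saas" (PySem.Str.lower text) || (PySem.Str.isIn "in your browser" (PySem.Str.lower text) || (PySem.Str.isIn "browser-based" (PySem.Str.lower text))))) = b7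
  cases b1 <;> cases b2 <;> cases b3 <;> cases b4 <;> cases b5 <;> cases b6 <;> cases b7 <;> rfl

set_option maxHeartbeats 1000000 in
theorem b_eq_spec7 (text : String) :
    detect_platforms_py_alt text = spec7
      (PySem.Str.isIn "windows" (PySem.Str.lower text) || (PySem.Str.isIn "win32" (PySem.Str.lower text) || (PySem.Str.isIn "win 10" (PySem.Str.lower text) || PySem.Str.isIn "win 11" (PySem.Str.lower text))))
      (PySem.Str.isIn "macos" (PySem.Str.lower text) || (PySem.Str.isIn "os x" (PySem.Str.lower text) || PySem.Str.isIn "mac" (PySem.Str.lower text)))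
      (PySem.Str.isIn "linux" (PySem.Str.lower text))
      (PySem.Str.isIn "ios" (PySem.Str.lower text) || (PySem.Str.isIn "iphone" (PySem.Str.lower text) || PySem.Str.isIn "ipad" (PySem.Str.lower text)))
      (PySem.Str.isIn "android" (PySem.Str.lower text))
      (PySem.Str.isIn "browser extension" (PySem.Str.lower text) || (PySem.Str.isIn "chrome extension" (PySem.Str.lower text) || (PySem.Str.isIn "firefox addon" (PySem.Str.lower text) || PySem.Str.isIn "firefox add-on" (PySem.Str.lower text))))
      (PySem.Str.isIn "web" (PySem.Str.lower text) || (PySem.Str.isIn "saas" (PySem.Str.lower text) || (PySem.Str.isIn "in your browser" (PySem.Str.lower text) || PySem.Str.isIn "browser-based" (PySem.Str.lower text)))) := by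
  unfold detect_platforms_py_alt spec7
  dsimp only
  have hfilter :
      (["Web", "Browser Extension", "Windows", "Mac", "Linux", "iOS", "Android"] : List String).filter
        (fun p => PySem.Set.contains ((List.range (PySem.Str.lower text).toList.length).foldl (fun found i =>
          pvTokenMap.foldl (fun found tp =>
            if PySem.Chars.startswith ((PySem.Str.lower text).toList.drop i) tp.1.toList then PySem.Set.add found tp.2 else found)
            found) PySem.Set.empty) p) =
      (["Web", "Browser Extension", "Windows", "Mac", "Linux", "iOS", "Android"] : List String).filter
        (fun p => if p = "Web" then (PySem.Str.isIn "web" (PySem.Str.lower text) || (PySem.Str.isIn "saas" (PySem.Str.lower text) || (PySem.Str.isIn "in your browser" (PySem.Str.lower text) || PySem.Str.isIn "browser-based" (PySem.Str.lower text)))) else if p = "Browser Extension" then (PySem.Str.isIn "browser extension" (PySem.Str.lower text) || (PySem.Str.isIn "chrome extension" (PySem.Str.lower text) || (PySem.Str.isIn "firefox addon" (PySem.Str.lower text) || PySem.Str.isIn "firefox add-on" (PySem.Str.lower text)))) else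
          if p = "Windows" then (PySem.Str.isIn "windows" (PySem.Str.lower text) || (PySem.Str.isIn "win32" (PySem.Str.lower text) || (PySem.Str.isIn "win 10" (PySem.Str.lower text) || PySem.Str.isIn "win 11" (PySem.Str.lower text)))) else if p = "Mac" then (PySem.Str.isIn "macos" (PySem.Str.lower text) || (PySem.Str.isIn "os x" (PySem.Str.lower text) || PySem.Str.isIn "mac" (PySem.Str.lower text))) else if p = "Linux" then PySem.Str.isIn "linux" (PySem.Str.lower text) else
          if p = "iOS" then (PySem.Str.isIn "ios" (PySem.Str.lower text) || (PySem.Str.isIn "iphone" (PySem.Str.lower text) || PySem.Str.isIn "ipad" (PySem.Str.lower text))) else PySem.Str.isIn "android" (PySem.Str.lower text)) := by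
    apply List.filter_congr
    intro p hp
    rw [set_contains_eq]
    fin_cases hp <;> simp only [mem_found] <;>
      simp only [pvTokenMap, List.mem_cons, List.not_mem_nil, or_false, exists_eq_or_imp,
        exists_eq_left, String.reduceEq, and_true, and_false, false_or,
        Bool.decide_or, Bool.decide_coe, ← PySem.Str.isIn_eq, reduceIte]
  rw [hfilter]

set_option maxHeartbeats 400000 in
theorem detect_platforms_eq (text : String) :
    detect_platforms_py text = detect_platforms_py_alt text := by
  rw [a_eq_spec7, b_eq_spec7]

-- ===== VERDICT (by name: the statement is the Claim_ definition above) =====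
theorem detect_platforms_py_spec : Claim_equal_detect_platforms_py := by
  intro text _
  exact detect_platforms_eq text
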